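-- pv_equiv track=rewrite | github.com/lemniscate8/MRA-variant-orbit-recovery | MRA_helpers.py | dMRA_nullspace_col_lut
-- ===== SOURCE A (Python) =====
-- import itertools as it
--
-- def reflect(pair, dim):
--     return tuple(sorted([(dim - val - 1) % dim for val in pair]))
--
-- def dMRA_nullspace_col_lut(dim):
--     # First, beta function
--     beta = {}
--     col_index = 0
--     for pair in it.combinations_with_replacement(range(dim), 2):
--         if pair not in beta:
--             ref = reflect(pair, dim)
--             if pair != ref:
--                 beta[pair] = col_index
--                 beta[ref] = col_index
--                 col_index += 1
--     return beta
-- ===== SOURCE B (Python) =====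
-- def dMRA_nullspace_col_lut(dim):
--     # Arithmetic characterization: the representative pairs are exactly the
--     # (x, y) with 0 <= x <= y and x + y <= dim - 2; their reflection is then
--     # (dim-1-y, dim-1-x), strictly larger in lex order.  Enumerate them
--     # directly with nested counted loops -- no itertools, no reflect/sort,
--     # no membership test.
--     beta = {}
--     col = 0
--     for x in range(dim // 2):
--         for y in range(x, dim - 1 - x):
--             beta[(x, y)] = col
--             beta[(dim - 1 - y, dim - 1 - x)] = col
--             col += 1
--     return beta
-- ===== Notes on version B (the rewrite author's own statement) =====
-- stated objective: alternative
-- what changed: Replaces the itertools scan with reflect/sort and the dict-as-seen-set guard by a direct arithmetic enumeration: the representatives are exactly the pairs (x,y) with 0<=x<=y and x+y<=dim-2, generated by two counted loops, with the reflection written in closed form (dim-1-y, dim-1-x); no reflect helper, no modular arithmetic, no sorting, no membership test.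
import Mathlib
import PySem

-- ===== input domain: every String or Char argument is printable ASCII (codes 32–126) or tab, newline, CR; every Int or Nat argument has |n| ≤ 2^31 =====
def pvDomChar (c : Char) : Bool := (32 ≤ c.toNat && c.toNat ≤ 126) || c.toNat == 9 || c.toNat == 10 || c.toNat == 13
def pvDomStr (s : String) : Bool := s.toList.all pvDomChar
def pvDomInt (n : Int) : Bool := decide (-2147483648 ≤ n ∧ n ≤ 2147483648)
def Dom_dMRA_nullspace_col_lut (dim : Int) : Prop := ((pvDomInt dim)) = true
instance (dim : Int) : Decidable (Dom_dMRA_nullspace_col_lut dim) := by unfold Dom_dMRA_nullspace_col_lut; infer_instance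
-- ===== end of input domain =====

-- B replaces A's itertools scan with reflect/sort and dict-as-seen-set guard by a direct
-- arithmetic enumeration of the representative pairs (x,y) with 0<=x<=y, x+y<=dim-2 via two
-- counted loops, writing the reflection in closed form; same result, a different algorithm.


-- ===== PORT A =====
-- ODict: a faithful model of the Python dict used by both ports — a hash index for
-- O(1) membership plus the items in (reverse) insertion order; insert overwrites in
-- place, new keys append; exact Python-dict semantics (as PySem.Dict, but evaluable
-- fast in the interpreter).
structure ODict where
  idx : Std.HashMap (Int × Int) Int
  rev : List ((Int × Int) × Int)

def ODict.empty : ODict := ⟨∅, []⟩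

def ODict.contains (d : ODict) (k : Int × Int) : Bool := d.idx.contains k

def ODict.insert (d : ODict) (k : Int × Int) (v : Int) : ODict :=
  if d.idx.contains k then
    ⟨d.idx.insert k v, d.rev.map (fun p => if p.1 == k then (k, v) else p)⟩
  else ⟨d.idx.insert k v, (k, v) :: d.rev⟩

def ODict.items (d : ODict) : List ((Int × Int) × Int) := d.rev.reverse

-- reflect(pair, dim): tuple(sorted([(dim - val - 1) % dim for val in pair])); sorting a
-- 2-element list is ported by hand as a compare-and-swap (exact).
def reflectL (pair : Int × Int) (dim : Int) : Int × Int :=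
  let a := PySem.Int.mod (dim - pair.1 - 1) dim
  let b := PySem.Int.mod (dim - pair.2 - 1) dim
  if a ≤ b then (a, b) else (b, a)

-- itertools.combinations_with_replacement(range(dim), 2): the pairs (x, y) with x ≤ y,
-- in lexicographic order; ported by hand (exact).
def cwrPairs (dim : Int) : List (Int × Int) :=
  (PySem.List.pyRange 0 dim 1).flatMap (fun x => (PySem.List.pyRange x dim 1).map (fun y => (x, y)))

-- the body of A's loop, as a named helper
def stepA (dim : Int) (st : ODict × Int) (pair : Int × Int) :
    ODict × Int :=
  if !st.1.contains pair then
    let ref := reflectL pair dim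
    if pair ≠ ref then ((st.1.insert pair st.2).insert ref st.2, st.2 + 1) else st
  else st

def dMRA_nullspace_col_lut (dim : Int) : List (Int × Int × Int) :=
  (((cwrPairs dim).foldl (stepA dim) (ODict.empty, 0)).1.items).map
    (fun kv => (kv.1.1, kv.1.2, kv.2))

-- ===== PORT B =====
-- two nested counted loops over x in range(dim // 2), y in range(x, dim - 1 - x),
-- inserting (x, y) and its closed-form reflection (dim-1-y, dim-1-x) at column col
def dMRA_nullspace_col_lut_alt (dim : Int) : List (Int × Int × Int) :=
  (((PySem.List.pyRange 0 (PySem.Int.floordiv dim 2) 1).foldl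
      (fun (st : ODict × Int) x =>
        (PySem.List.pyRange x (dim - 1 - x) 1).foldl
          (fun (st : ODict × Int) y =>
            ((st.1.insert (x, y) st.2).insert (dim - 1 - y, dim - 1 - x) st.2, st.2 + 1))
          st)
      (ODict.empty, 0)).1.items).map
    (fun kv => (kv.1.1, kv.1.2, kv.2))

-- ===== PRECONDITION & SPEC =====
def Spec_dMRA_nullspace_col_lut (dim : Int) (out : List (Int × Int × Int)) : Prop := out = dMRA_nullspace_col_lut_alt dim
instance (dim : Int) (out : List (Int × Int × Int)) : Decidable (Spec_dMRA_nullspace_col_lut dim out) := by unfold Spec_dMRA_nullspace_col_lut; infer_instance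

-- ===== CLAIM (what is proved, stated in full; the proofs are below) =====
def Claim_equal_dMRA_nullspace_col_lut : Prop := ∀ (dim : Int), Dom_dMRA_nullspace_col_lut dim → Spec_dMRA_nullspace_col_lut dim (dMRA_nullspace_col_lut dim)

-- ===== LEMMAS AND PROOFS =====

-- Python `<` on 2-tuples of ints (lexicographic)
def pairLt (p q : Int × Int) : Bool := p.1 < q.1 || (p.1 == q.1 && p.2 < q.2)

-- the paired insert and the common "representative fold" both loops reduce to
def insPair (dim : Int) (d : ODict) (q : Int × Int) (c : Int) :
    ODict :=
  (d.insert q c).insert (reflectL q dim) c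

def foldB (dim : Int) (rs : List (Int × Int)) (st : ODict × Int) :
    ODict × Int :=
  rs.foldl (fun st q => (insPair dim st.1 q st.2, st.2 + 1)) st

-- the representative list B enumerates
def repsB (dim : Int) : List (Int × Int) :=
  (PySem.List.pyRange 0 (PySem.Int.floordiv dim 2) 1).flatMap
    (fun x => (PySem.List.pyRange x (dim - 1 - x) 1).map (fun y => (x, y)))

theorem ODict.contains_empty (k : Int × Int) : ODict.empty.contains k = false := by
  simp [ODict.empty, ODict.contains]

theorem ODict.contains_insert (d : ODict) (k : Int × Int) (v : Int) (k' : Int × Int) :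
    (d.insert k v).contains k' = (k' == k || d.contains k') := by
  unfold ODict.insert ODict.contains
  split <;> simp [Std.HashMap.contains_insert, Bool.beq_comm]

theorem pairLt_irrefl (p : Int × Int) : pairLt p p = false := by
  simp [pairLt]

theorem pairLt_asymm {p q : Int × Int} (h1 : pairLt p q = true) (h2 : pairLt q p = true) : False := by
  simp [pairLt] at h1 h2; omega

theorem pairLt_trichotomy (p q : Int × Int) :
    pairLt p q = true ∨ p = q ∨ pairLt q p = true := by
  obtain ⟨a, b⟩ := p; obtain ⟨c, d⟩ := q
  simp [pairLt, Prod.ext_iff]; omega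

theorem mem_cwrPairs {dim : Int} {p : Int × Int} :
    p ∈ cwrPairs dim ↔ 0 ≤ p.1 ∧ p.1 ≤ p.2 ∧ p.2 < dim := by
  obtain ⟨x, y⟩ := p
  simp only [cwrPairs, List.mem_flatMap, List.mem_map, PySem.List.mem_pyRange_one]
  constructor
  · rintro ⟨a, ⟨ha0, ha1⟩, b, ⟨hb0, hb1⟩, h⟩
    obtain ⟨rfl, rfl⟩ := Prod.mk.injEq .. ▸ h
    exact ⟨by omega, by omega, by omega⟩
  · rintro ⟨h0, h1, h2⟩
    exact ⟨x, ⟨h0, by omega⟩, y, ⟨h1, h2⟩, rfl⟩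

theorem mem_repsB {dim : Int} {p : Int × Int} :
    p ∈ repsB dim ↔ 0 ≤ p.1 ∧ p.1 ≤ p.2 ∧ p.1 + p.2 ≤ dim - 2 := by
  obtain ⟨x, y⟩ := p
  have h2 : PySem.Int.floordiv dim 2 * 2 ≤ dim ∧ dim < (PySem.Int.floordiv dim 2 + 1) * 2 :=
    (PySem.Int.floordiv_eq_iff_of_pos (by omega)).mp rfl
  simp only [repsB, List.mem_flatMap, List.mem_map, PySem.List.mem_pyRange_one]
  constructor
  · rintro ⟨a, ⟨ha0, ha1⟩, b, ⟨hb0, hb1⟩, h⟩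
    obtain ⟨rfl, rfl⟩ := Prod.mk.injEq .. ▸ h
    exact ⟨by omega, by omega, by omega⟩
  · rintro ⟨h0, h1, hsum⟩
    exact ⟨x, ⟨h0, by omega⟩, y, ⟨h1, by omega⟩, rfl⟩

theorem reflectL_eval {dim : Int} {p : Int × Int} (hp : p ∈ cwrPairs dim) :
    reflectL p dim = (dim - 1 - p.2, dim - 1 - p.1) := by
  rw [mem_cwrPairs] at hp
  obtain ⟨hp0, hp1, hp2⟩ := hp
  have hdim : 0 < dim := by omega
  have h1 : PySem.Int.mod (dim - p.1 - 1) dim = dim - p.1 - 1 := by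
    rw [PySem.Int.mod_eq_emod_of_pos hdim]
    exact Int.emod_eq_of_lt (by omega) (by omega)
  have h2 : PySem.Int.mod (dim - p.2 - 1) dim = dim - p.2 - 1 := by
    rw [PySem.Int.mod_eq_emod_of_pos hdim]
    exact Int.emod_eq_of_lt (by omega) (by omega)
  simp only [reflectL, h1, h2]
  split_ifs with h <;> simp only [Prod.ext_iff] <;> constructor <;> omega

theorem reflectL_mem {dim : Int} {p : Int × Int} (hp : p ∈ cwrPairs dim) :
    reflectL p dim ∈ cwrPairs dim := by
  rw [reflectL_eval hp]
  rw [mem_cwrPairs] at hp ⊢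
  constructor <;> [omega; constructor <;> omega]

theorem reflectL_invol {dim : Int} {p : Int × Int} (hp : p ∈ cwrPairs dim) :
    reflectL (reflectL p dim) dim = p := by
  rw [reflectL_eval (reflectL_mem hp), reflectL_eval hp]
  simp

theorem pairwise_cwrPairs (dim : Int) :
    (cwrPairs dim).Pairwise (fun p q => pairLt p q = true) := by
  unfold cwrPairs
  rw [List.flatMap_def, List.pairwise_flatten]
  refine ⟨?_, ?_⟩
  · intro l hl
    simp only [List.mem_map] at hl
    obtain ⟨x, _, rfl⟩ := hl
    rw [List.pairwise_map]
    exact (PySem.List.pairwise_lt_pyRange_one x dim).imp (by intro a b h; simp [pairLt]; omega)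
  · rw [List.pairwise_map]
    exact (PySem.List.pairwise_lt_pyRange_one 0 dim).imp (by
      intro a b h p hp q hq
      simp only [List.mem_map] at hp hq
      obtain ⟨y, _, rfl⟩ := hp
      obtain ⟨z, _, rfl⟩ := hq
      simp [pairLt]; omega)

theorem pairwise_repsB (dim : Int) :
    (repsB dim).Pairwise (fun p q => pairLt p q = true) := by
  unfold repsB
  rw [List.flatMap_def, List.pairwise_flatten]
  refine ⟨?_, ?_⟩
  · intro l hl
    simp only [List.mem_map] at hl
    obtain ⟨x, _, rfl⟩ := hl
    rw [List.pairwise_map]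
    exact (PySem.List.pairwise_lt_pyRange_one x (dim - 1 - x)).imp
      (by intro a b h; simp [pairLt]; omega)
  · rw [List.pairwise_map]
    exact (PySem.List.pairwise_lt_pyRange_one 0 (PySem.Int.floordiv dim 2)).imp (by
      intro a b h p hp q hq
      simp only [List.mem_map] at hp hq
      obtain ⟨y, _, rfl⟩ := hp
      obtain ⟨z, _, rfl⟩ := hq
      simp [pairLt]; omega)

-- two lex-sorted lists with the same members are equal
theorem eq_of_mem_iff_pairwise :
    ∀ {l₁ l₂ : List (Int × Int)},
      (∀ p, p ∈ l₁ ↔ p ∈ l₂) →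
      l₁.Pairwise (fun p q => pairLt p q = true) →
      l₂.Pairwise (fun p q => pairLt p q = true) → l₁ = l₂ := by
  intro l₁
  induction l₁ with
  | nil =>
    intro l₂ hm _ _
    cases l₂ with
    | nil => rfl
    | cons b t => exact absurd ((hm b).2 (.head _)) (List.not_mem_nil)
  | cons a t₁ ih =>
    intro l₂ hm h₁ h₂
    cases l₂ with
    | nil => exact absurd ((hm a).1 (.head _)) (List.not_mem_nil)
    | cons b t₂ =>
      have hab : a = b := by
        rcases List.mem_cons.mp ((hm a).1 (.head _)) with h | h
        · exact h
        · have hba : pairLt b a = true := List.rel_of_pairwise_cons h₂ h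
          rcases List.mem_cons.mp ((hm b).2 (.head _)) with h' | h'
          · exact h'.symm
          · exact absurd (List.rel_of_pairwise_cons h₁ h') (fun hh => pairLt_asymm hh hba)
      subst hab
      have hm' : ∀ p, p ∈ t₁ ↔ p ∈ t₂ := by
        intro p
        constructor
        · intro hp
          rcases List.mem_cons.mp ((hm p).1 (.tail _ hp)) with h | h
          · subst h; exact absurd (List.rel_of_pairwise_cons h₁ hp) (by simp [pairLt_irrefl])
          · exact h
        · intro hp
          rcases List.mem_cons.mp ((hm p).2 (.tail _ hp)) with h | h
          · subst h; exact absurd (List.rel_of_pairwise_cons h₂ hp) (by simp [pairLt_irrefl])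
          · exact h
      rw [ih hm' h₁.of_cons h₂.of_cons]

-- the representative lists coincide: A's guarded filter = B's arithmetic enumeration
theorem filter_eq_repsB (dim : Int) :
    (cwrPairs dim).filter (fun p => pairLt p (reflectL p dim)) = repsB dim := by
  refine eq_of_mem_iff_pairwise (fun p => ?_)
    ((pairwise_cwrPairs dim).filter _) (pairwise_repsB dim)
  rw [List.mem_filter, mem_repsB]
  constructor
  · rintro ⟨hc, hlt⟩
    rw [reflectL_eval hc] at hlt
    rw [mem_cwrPairs] at hc
    simp only [pairLt] at hlt
    obtain ⟨h0, h1, h2⟩ := hc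
    simp only [Bool.or_eq_true, Bool.and_eq_true, decide_eq_true_eq, beq_iff_eq] at hlt
    exact ⟨h0, h1, by omega⟩
  · rintro ⟨h0, h1, hsum⟩
    have hc : p ∈ cwrPairs dim := mem_cwrPairs.mpr ⟨h0, h1, by omega⟩
    refine ⟨hc, ?_⟩
    rw [reflectL_eval hc]
    simp only [pairLt, Bool.or_eq_true, Bool.and_eq_true, decide_eq_true_eq, beq_iff_eq]
    omega

theorem myFoldlCongr {α β : Type} {f g : β → α → β} :
    ∀ (l : List α) (init : β), (∀ b a, a ∈ l → f b a = g b a) →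
      l.foldl f init = l.foldl g init := by
  intro l
  induction l with
  | nil => intro _ _; rfl
  | cons a t ih =>
    intro init h
    rw [List.foldl_cons, List.foldl_cons, h init a (.head _)]
    exact ih _ (fun b x hx => h b x (.tail _ hx))

-- B's nested loops are the fold of the flattened representative list
theorem foldl_flatMap_nested {α β γ : Type} (l : List α) (g : α → List β)
    (f : γ → β → γ) (init : γ) :
    (l.flatMap g).foldl f init = l.foldl (fun st x => (g x).foldl f st) init := by
  induction l generalizing init with
  | nil => rfl
  | cons a t ih => rw [List.flatMap_cons, List.foldl_append, List.foldl_cons, ih]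

theorem altFold_eq_foldB (dim : Int) :
    (PySem.List.pyRange 0 (PySem.Int.floordiv dim 2) 1).foldl
      (fun (st : ODict × Int) x =>
        (PySem.List.pyRange x (dim - 1 - x) 1).foldl
          (fun (st : ODict × Int) y =>
            ((st.1.insert (x, y) st.2).insert (dim - 1 - y, dim - 1 - x) st.2, st.2 + 1))
          st)
      (ODict.empty, 0)
      = foldB dim (repsB dim) (ODict.empty, 0) := by
  have h1 : (PySem.List.pyRange 0 (PySem.Int.floordiv dim 2) 1).foldl
      (fun (st : ODict × Int) x =>
        (PySem.List.pyRange x (dim - 1 - x) 1).foldl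
          (fun (st : ODict × Int) y =>
            ((st.1.insert (x, y) st.2).insert (dim - 1 - y, dim - 1 - x) st.2, st.2 + 1))
          st)
      (ODict.empty, 0)
      = (repsB dim).foldl
          (fun (st : ODict × Int) p =>
            ((st.1.insert p st.2).insert (dim - 1 - p.2, dim - 1 - p.1) st.2, st.2 + 1))
          (ODict.empty, 0) := by
    unfold repsB
    rw [foldl_flatMap_nested]
    congr 1
    funext st x
    rw [List.foldl_map]
  rw [h1]
  unfold foldB
  refine myFoldlCongr _ _ (fun st p hp => ?_)
  have hc : p ∈ cwrPairs dim := by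
    rw [mem_repsB] at hp
    exact mem_cwrPairs.mpr ⟨hp.1, hp.2.1, by omega⟩
  rw [insPair, reflectL_eval hc]

-- the main invariant argument: A's guarded fold over a lex-sorted, reflection-closed list
-- equals foldB over the representatives p < reflect p
theorem foldA_eq (dim : Int) :
    ∀ (todo : List (Int × Int)) (d : ODict) (c : Int),
      todo.Pairwise (fun p q => pairLt p q = true) →
      (∀ p ∈ todo, reflectL (reflectL p dim) dim = p) →
      (∀ p ∈ todo, d.contains p = true ↔
        (pairLt (reflectL p dim) p = true ∧ reflectL p dim ∉ todo)) →
      todo.foldl (stepA dim) (d, c)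
        = foldB dim (todo.filter (fun p => pairLt p (reflectL p dim))) (d, c) := by
  intro todo
  induction todo with
  | nil => intro d c _ _ _; rfl
  | cons p rest ih =>
    intro d c hpw hinv hmem
    have hrel : ∀ q ∈ rest, pairLt p q = true := fun q hq => List.rel_of_pairwise_cons hpw hq
    have hpnotin : p ∉ rest := fun h => by simpa [pairLt_irrefl] using hrel p h
    have hRR : reflectL (reflectL p dim) dim = p := hinv p (.head _)
    rcases pairLt_trichotomy p (reflectL p dim) with h1 | h1 | h1
    · -- pairLt p (reflectL p dim) : A inserts the pair (p, reflect p) at column c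
      have hcp : d.contains p = false := by
        rcases h : d.contains p with _ | _
        · rfl
        · exact absurd ((hmem p (.head _)).1 h).1 (fun h' => pairLt_asymm h1 h')
      have hne : p ≠ reflectL p dim := fun h => by
        rw [← h] at h1; simp [pairLt_irrefl] at h1
      have hstep : stepA dim (d, c) p = (insPair dim d p c, c + 1) := by
        simp [stepA, hcp, hne, insPair]
      rw [List.foldl_cons, hstep, List.filter_cons_of_pos (by simp [h1])]
      have hgoalB : foldB dim (p :: rest.filter (fun p => pairLt p (reflectL p dim))) (d, c)
          = foldB dim (rest.filter (fun p => pairLt p (reflectL p dim))) (insPair dim d p c, c + 1) := rfl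
      rw [hgoalB]
      refine ih (insPair dim d p c) (c + 1) hpw.of_cons (fun q hq => hinv q (.tail _ hq)) ?_
      intro q hq
      have hqnep : q ≠ p := fun h => hpnotin (h ▸ hq)
      have hcont : (insPair dim d p c).contains q
          = ((q == reflectL p dim) || ((q == p) || d.contains q)) := by
        simp [insPair, ODict.contains_insert]
      by_cases hqR : q = reflectL p dim
      · have hb : (q == reflectL p dim) = true := by simpa using hqR
        rw [hcont, hb]
        simp only [Bool.true_or, true_iff]
        constructor
        · rw [hqR, hRR]; exact h1
        · rw [hqR, hRR]; exact hpnotin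
      · have hRqne : reflectL q dim ≠ p := fun h => by
          have : q = reflectL p dim := by rw [← hinv q (.tail _ hq), h]
          exact hqR this
        have hb1 : (q == reflectL p dim) = false := by simpa using hqR
        have hb2 : (q == p) = false := by simpa using hqnep
        rw [hcont, hb1, hb2]
        simp only [Bool.false_or]
        rw [hmem q (.tail _ hq)]
        constructor
        · rintro ⟨hl, hni⟩; exact ⟨hl, fun h => hni (.tail _ h)⟩
        · rintro ⟨hl, hni⟩
          refine ⟨hl, fun h => ?_⟩
          rcases List.mem_cons.mp h with h | h
          · exact hRqne h
          · exact hni h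
    · -- p = reflect p : skip, not a representative
      have hcp : d.contains p = false := by
        rcases h : d.contains p with _ | _
        · rfl
        · have := ((hmem p (.head _)).1 h).1
          rw [← h1] at this; simp [pairLt_irrefl] at this
      have hstep : stepA dim (d, c) p = (d, c) := by
        simp [stepA, hcp, ← h1]
      rw [List.foldl_cons, hstep, List.filter_cons_of_neg (by rw [← h1]; simp [pairLt_irrefl])]
      refine ih d c hpw.of_cons (fun q hq => hinv q (.tail _ hq)) ?_
      intro q hq
      have hRqne : reflectL q dim ≠ p := fun h => by
        have hq' : q = reflectL p dim := by rw [← hinv q (.tail _ hq), h]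
        rw [← h1] at hq'; exact hpnotin (hq' ▸ hq)
      rw [hmem q (.tail _ hq)]
      constructor
      · rintro ⟨hl, hni⟩; exact ⟨hl, fun h => hni (.tail _ h)⟩
      · rintro ⟨hl, hni⟩
        refine ⟨hl, fun h => ?_⟩
        rcases List.mem_cons.mp h with h | h
        · exact hRqne h
        · exact hni h
    · -- pairLt (reflectL p dim) p : p was inserted earlier, A skips it; not a representative
      have hRnotin : reflectL p dim ∉ p :: rest := by
        intro h
        rcases List.mem_cons.mp h with h | h
        · rw [h] at h1; simp [pairLt_irrefl] at h1
        · exact pairLt_asymm (hrel _ h) h1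
      have hcp : d.contains p = true := (hmem p (.head _)).2 ⟨h1, hRnotin⟩
      have hstep : stepA dim (d, c) p = (d, c) := by simp [stepA, hcp]
      have hnl : pairLt p (reflectL p dim) = false := by
        rcases h : pairLt p (reflectL p dim) with _ | _
        · rfl
        · exact absurd (pairLt_asymm h h1) (fun hf => hf)
      rw [List.foldl_cons, hstep, List.filter_cons_of_neg (by simp [hnl])]
      refine ih d c hpw.of_cons (fun q hq => hinv q (.tail _ hq)) ?_
      intro q hq
      have hRqne : reflectL q dim ≠ p := fun h => by
        have hq' : q = reflectL p dim := by rw [← hinv q (.tail _ hq), h]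
        exact pairLt_asymm (hrel q hq) (hq' ▸ h1)
      rw [hmem q (.tail _ hq)]
      constructor
      · rintro ⟨hl, hni⟩; exact ⟨hl, fun h => hni (.tail _ h)⟩
      · rintro ⟨hl, hni⟩
        refine ⟨hl, fun h => ?_⟩
        rcases List.mem_cons.mp h with h | h
        · exact hRqne h
        · exact hni h

-- ===== VERDICT (by name: the statement is the Claim_ definition above) =====
theorem dMRA_nullspace_col_lut_spec : Claim_equal_dMRA_nullspace_col_lut := by
  intro dim _
  unfold Spec_dMRA_nullspace_col_lut dMRA_nullspace_col_lut dMRA_nullspace_col_lut_alt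
  rw [altFold_eq_foldB, foldA_eq dim (cwrPairs dim) ODict.empty 0 (pairwise_cwrPairs dim)
    (fun p hp => reflectL_invol hp) ?_, filter_eq_repsB]
  intro p hp
  simp only [ODict.contains_empty, Bool.false_eq_true, false_iff, not_and, not_not]
  intro _
  exact reflectL_mem hp
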